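-- pv_equiv track=rewrite | github.com/mileslenz18/Advent-of-Code-2020 | day6_code.py | part_one
-- ===== SOURCE A (Python) =====
-- def part_one(content):
--     """Count questions answered with yes from at least one for each group."""
--
--     groups = []
--
--     group = []
--     for line in content:
--         if line == '':
--             groups.append(group)
--             group = []
--         else:
--             group.append(line)
--     groups.append(group)
--
--     counts = []
--     for group in groups:
--         questions = set()
--         for answer in group:
--             for letter in answer:
--                 questions.add(letter)
--         counts.append(len(questions))
--
--     result = sum(counts)
--
--     return result
-- ===== SOURCE B (Python) =====
-- def part_one(content):
--     """Count questions answered with yes from at least one for each group."""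
--     total = 0
--     cur = set()
--     for line in content:
--         if line == '':
--             total += len(cur)
--             cur = set()
--         else:
--             cur.update(line)
--     return total + len(cur)
-- ===== Notes on version B (the rewrite author's own statement) =====
-- stated objective: simpler
-- what changed: Single streaming pass with a running total and one maintained set, fusing A's group-splitting pass and its separate per-group set-building/counting passes and removing the intermediate groups and counts lists.
import Mathlib
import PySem

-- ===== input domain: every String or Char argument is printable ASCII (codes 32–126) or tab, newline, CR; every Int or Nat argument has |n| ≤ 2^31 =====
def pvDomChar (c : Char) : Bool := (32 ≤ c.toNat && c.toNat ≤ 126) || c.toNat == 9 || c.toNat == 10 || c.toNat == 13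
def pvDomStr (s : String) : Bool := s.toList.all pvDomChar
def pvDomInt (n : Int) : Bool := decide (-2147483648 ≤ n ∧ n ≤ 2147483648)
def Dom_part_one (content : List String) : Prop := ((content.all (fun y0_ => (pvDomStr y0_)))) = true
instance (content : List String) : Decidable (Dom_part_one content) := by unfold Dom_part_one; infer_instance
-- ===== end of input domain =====

-- B fuses A's group-splitting and per-group counting passes into one streaming pass (objective: simpler).

-- ===== PORT A =====
-- A: split content into groups at blank lines, then per group build a set of all letters and sum the set sizes.
def part_one (content : List String) : Int :=
  let st := content.foldl
    (fun (st : List (List String) × List String) line =>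
      if line == "" then (st.1 ++ [st.2], []) else (st.1, st.2 ++ [line]))
    ([], [])
  let groups := st.1 ++ [st.2]
  let counts := groups.map (fun group =>
    PySem.Set.len (group.foldl
      (fun (questions : PySem.Set Char) answer =>
        answer.toList.foldl (fun qs letter => PySem.Set.add qs letter) questions)
      PySem.Set.empty))
  counts.sum

-- ===== PORT B =====
-- B: one pass keeping a running total and the current group's letter set.
def part_one_alt (content : List String) : Int :=
  let st := content.foldl
    (fun (st : Int × PySem.Set Char) line =>
      if line == "" then (st.1 + PySem.Set.len st.2, PySem.Set.empty)
      else (st.1, PySem.Set.update st.2 line.toList))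
    (0, PySem.Set.empty)
  st.1 + PySem.Set.len st.2

-- ===== PRECONDITION & SPEC =====
def Spec_part_one (content : List String) (out : Int) : Prop := out = part_one_alt content
instance (content : List String) (out : Int) : Decidable (Spec_part_one content out) := by unfold Spec_part_one; infer_instance

-- ===== CLAIM (what is proved, stated in full; the proofs are below) =====
def Claim_equal_part_one : Prop := ∀ (content : List String), Dom_part_one content → Spec_part_one content (part_one content)

-- ===== LEMMAS AND PROOFS =====

-- the letter set A builds for one group
def pvGroupSet (g : List String) : PySem.Set Char :=
  g.foldl (fun (qs : PySem.Set Char) answer =>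
    answer.toList.foldl (fun qs letter => PySem.Set.add qs letter) qs) PySem.Set.empty

-- A's count for one group
def pvCount (g : List String) : Int := PySem.Set.len (pvGroupSet g)

lemma pvGroupSet_append (g : List String) (line : String) :
    pvGroupSet (g ++ [line]) = PySem.Set.update (pvGroupSet g) line.toList := by
  simp [pvGroupSet, List.foldl_append, PySem.Set.update]

-- main invariant: A's fold state (gs, g) and B's fold state (t, cur) stay related
lemma pv_main (content : List String) :
    ∀ (gs : List (List String)) (g : List String) (t : Int),
      t = (gs.map pvCount).sum →
      (let st := content.foldl
          (fun (st : List (List String) × List String) line =>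
            if line == "" then (st.1 ++ [st.2], []) else (st.1, st.2 ++ [line]))
          (gs, g)
       ((st.1 ++ [st.2]).map pvCount).sum) =
      (let st := content.foldl
          (fun (st : Int × PySem.Set Char) line =>
            if line == "" then (st.1 + PySem.Set.len st.2, PySem.Set.empty)
            else (st.1, PySem.Set.update st.2 line.toList))
          (t, pvGroupSet g)
       st.1 + PySem.Set.len st.2) := by
  induction content with
  | nil =>
    intro gs g t ht
    simp [ht, pvCount]
  | cons line rest ih =>
    intro gs g t ht
    by_cases h : line == ""
    · simp only [List.foldl_cons, h, if_pos]
      have := ih (gs ++ [g]) [] (t + PySem.Set.len (pvGroupSet g))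
        (by simp [ht, pvCount])
      simpa [pvGroupSet] using this
    · simp only [List.foldl_cons, h, if_neg, Bool.false_eq_true, not_false_iff]
      have := ih gs (g ++ [line]) t ht
      rw [pvGroupSet_append] at this
      simpa using this

-- ===== VERDICT (by name: the statement is the Claim_ definition above) =====
theorem part_one_spec : Claim_equal_part_one := by
  intro content _
  show part_one content = part_one_alt content
  have := pv_main content [] [] 0 (by simp)
  simpa [part_one, part_one_alt, pvGroupSet] using this
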